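-- pv_equiv track=rewrite | github.com/sixwheel-inc/simulink-protobuf-mcap | protogen/matlab_helpers.py | find_and_rename_root_bus
-- ===== SOURCE A (Python) =====
-- def find_and_rename_root_bus(mat_structure, root_name="DenseLog"):
--     """We don't want extra bus definitions that aren't used by any other bus"""
--     all_depended_on = set()
--     for bus_name, bus in mat_structure.items():
--         for name, type_ in bus.items():
--             if type_ in mat_structure:
--                 all_depended_on.add(type_)
--
--     roots = set(mat_structure.keys()) - all_depended_on
--
--     assert len(roots) == 1
--     root = roots.pop()
--     mat_structure[root_name] = mat_structure.pop(root)
--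
--     assert root_name not in all_depended_on
--     assert root_name in mat_structure.keys()
--     return root_name
-- ===== SOURCE B (Python) =====
-- def find_and_rename_root_bus(mat_structure, root_name="DenseLog"):
--     """We don't want extra bus definitions that aren't used by any other bus"""
--     def referenced(name):
--         # rescan every bus on demand instead of precomputing an index
--         for bus in mat_structure.values():
--             for type_ in bus.values():
--                 if type_ == name:
--                     return True
--         return False
--
--     roots = [k for k in mat_structure if not referenced(k)]
--     assert len(roots) == 1
--     assert not (root_name in mat_structure and referenced(root_name))
--     root = roots[0]
--     mat_structure[root_name] = mat_structure.pop(root)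
--     assert root_name in mat_structure.keys()
--     return root_name
-- ===== Notes on version B (the rewrite author's own statement) =====
-- stated objective: alternative
-- what changed: Replaced A's precomputed all_depended_on set (index build, then set difference over set(keys)) with on-demand nested rescans: each key is tested for being referenced by scanning every bus's field types, roots are collected as a list comprehension, and the root_name assertion is a direct scan performed before the mutation.
import Mathlib
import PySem

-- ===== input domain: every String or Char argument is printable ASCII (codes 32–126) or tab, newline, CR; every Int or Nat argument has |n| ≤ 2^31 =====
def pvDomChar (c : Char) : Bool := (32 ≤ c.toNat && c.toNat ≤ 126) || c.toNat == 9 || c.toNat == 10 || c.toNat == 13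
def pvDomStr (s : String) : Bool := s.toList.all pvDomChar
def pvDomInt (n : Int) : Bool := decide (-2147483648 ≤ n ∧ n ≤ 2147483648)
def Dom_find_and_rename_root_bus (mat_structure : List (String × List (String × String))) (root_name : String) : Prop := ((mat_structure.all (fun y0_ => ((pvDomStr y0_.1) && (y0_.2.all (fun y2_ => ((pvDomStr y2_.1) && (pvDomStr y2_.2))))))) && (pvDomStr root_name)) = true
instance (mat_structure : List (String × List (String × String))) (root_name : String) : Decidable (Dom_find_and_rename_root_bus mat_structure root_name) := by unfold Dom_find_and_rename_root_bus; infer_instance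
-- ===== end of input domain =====

-- B replaces A's precomputed depended-on set by on-demand rescans of all bus fields (objective: alternative decomposition).
-- Both Pythons mutate the dict the same way when they return (pop the root, reinsert under root_name); the theorems are
-- about the RETURN value only. Where an assertion fails the Pythons raise; Pre_ excludes those inputs and the ports return "" there.

-- ===== PORT A =====
def find_and_rename_root_bus (mat_structure : List (String × List (String × String))) (root_name : String) : String :=
  let d := PySem.Dict.mk mat_structure
  -- for bus_name, bus in mat_structure.items(): for name, type_ in bus.items(): if type_ in mat_structure: all_depended_on.add(type_)
  let all_depended_on : PySem.Set String :=
    mat_structure.foldl (fun s bus =>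
      bus.2.foldl (fun s f => if d.contains f.2 then PySem.Set.add s f.2 else s) s)
      PySem.Set.empty
  -- roots = set(mat_structure.keys()) - all_depended_on
  let roots : PySem.Set String := PySem.Set.diff (PySem.Set.ofList (PySem.Dict.keys d)) all_depended_on
  if roots.len = 1 then                   -- assert len(roots) == 1 (raise → "" outside Pre_)
    let root := roots.headD ""            -- roots.pop() on a singleton set
    match d.pop? root with                -- mat_structure.pop(root)
    | none => ""                          -- KeyError (unreachable: root is a key)
    | some (v, d') =>
      let d2 := d'.insert root_name v     -- mat_structure[root_name] = …
      if !(all_depended_on.contains root_name) then      -- assert root_name not in all_depended_on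
        if d2.contains root_name then root_name else ""  -- assert root_name in mat_structure.keys()
      else ""
  else ""

-- ===== PORT B =====
-- referenced(name): scan every bus's field types for `name`
def pvReferenced (mat_structure : List (String × List (String × String))) (name : String) : Bool :=
  mat_structure.any (fun bus => bus.2.any (fun f => f.2 == name))

def find_and_rename_root_bus_alt (mat_structure : List (String × List (String × String))) (root_name : String) : String :=
  let d := PySem.Dict.mk mat_structure
  let roots := (PySem.Dict.keys d).filter (fun k => !pvReferenced mat_structure k)
  if roots.length = 1 then
    if !(d.contains root_name && pvReferenced mat_structure root_name) then
      let root := roots.headD ""          -- roots[0], guarded by len(roots) == 1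
      match d.pop? root with
      | none => ""
      | some (v, d') =>
        let d2 := d'.insert root_name v
        if d2.contains root_name then root_name else ""
    else ""
  else ""

-- ===== PRECONDITION & SPEC =====
-- Pre_ excludes (a) lists whose keys repeat — they cannot arise from a Python dict, A's actual argument type — and
-- (b) the inputs where A's assertions fail (not exactly one root, or root_name a referenced key), on which A raises AssertionError.
def Pre_find_and_rename_root_bus (mat_structure : List (String × List (String × String))) (root_name : String) : Prop :=
  (mat_structure.map Prod.fst).Nodup ∧
  ((mat_structure.map Prod.fst).filter (fun k => !pvReferenced mat_structure k)).length = 1 ∧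
  ¬ ((mat_structure.map Prod.fst).contains root_name = true ∧ pvReferenced mat_structure root_name = true)
instance (mat_structure : List (String × List (String × String))) (root_name : String) : Decidable (Pre_find_and_rename_root_bus mat_structure root_name) := by unfold Pre_find_and_rename_root_bus; infer_instance

def pvWitness_find_and_rename_root_bus : (List (String × List (String × String))) × String :=
  ([("Top", [("a", "Leaf"), ("b", "int")]), ("Leaf", [("x", "double")])], "DenseLog")

def Spec_find_and_rename_root_bus (mat_structure : List (String × List (String × String))) (root_name : String) (out : String) : Prop := out = find_and_rename_root_bus_alt mat_structure root_name
instance (mat_structure : List (String × List (String × String))) (root_name : String) (out : String) : Decidable (Spec_find_and_rename_root_bus mat_structure root_name out) := by unfold Spec_find_and_rename_root_bus; infer_instance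

-- ===== CLAIM (what is proved, stated in full; the proofs are below) =====
def Claim_equal_find_and_rename_root_bus : Prop := ∀ (mat_structure : List (String × List (String × String))) (root_name : String), Dom_find_and_rename_root_bus mat_structure root_name → Pre_find_and_rename_root_bus mat_structure root_name → Spec_find_and_rename_root_bus mat_structure root_name (find_and_rename_root_bus mat_structure root_name)

-- ===== LEMMAS AND PROOFS =====

theorem pv_contains_add (s : PySem.Set String) (x t : String) :
    PySem.Set.contains (PySem.Set.add s x) t = (PySem.Set.contains s t || (x == t)) := by
  rw [Bool.eq_iff_iff]
  simp [PySem.Set.mem_add]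
  tauto

-- membership in A's inner loop accumulator
theorem pv_inner (m : List (String × List (String × String))) (l : List (String × String)) (s : PySem.Set String) (t : String) :
    PySem.Set.contains
      (l.foldl (fun s f => if (PySem.Dict.mk m).contains f.2 then PySem.Set.add s f.2 else s) s) t
    = (PySem.Set.contains s t || ((PySem.Dict.mk m).contains t && l.any (fun f => f.2 == t))) := by
  induction l generalizing s with
  | nil => simp
  | cons f l ih =>
    simp only [List.foldl_cons, List.any_cons]
    by_cases hd : (PySem.Dict.mk m).contains f.2 = true
    · rw [if_pos hd, ih, pv_contains_add]
      by_cases hft : f.2 = t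
      · subst hft; simp [hd]
      · have hbeq : (f.2 == t) = false := beq_eq_false_iff_ne.mpr hft
        simp [hbeq]
    · have hd' : (PySem.Dict.mk m).contains f.2 = false := Bool.eq_false_iff.mpr hd
      rw [if_neg hd, ih]
      by_cases hft : f.2 = t
      · subst hft; simp [hd']
      · have hbeq : (f.2 == t) = false := beq_eq_false_iff_ne.mpr hft
        simp [hbeq]

-- membership in A's full double loop accumulator
theorem pv_outer (m l : List (String × List (String × String))) (s : PySem.Set String) (t : String) :
    PySem.Set.contains
      (l.foldl (fun s bus => bus.2.foldl (fun s f => if (PySem.Dict.mk m).contains f.2 then PySem.Set.add s f.2 else s) s) s) t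
    = (PySem.Set.contains s t || ((PySem.Dict.mk m).contains t && l.any (fun bus => bus.2.any (fun f => f.2 == t)))) := by
  induction l generalizing s with
  | nil => simp
  | cons bus l ih =>
    simp only [List.foldl_cons, List.any_cons]
    rw [ih, pv_inner]
    cases hC : (PySem.Dict.mk m).contains t <;> simp [Bool.or_assoc]

-- A's all_depended_on set contains t iff t is a key and some field references it
theorem pv_allDep (m : List (String × List (String × String))) (t : String) :
    PySem.Set.contains
      (m.foldl (fun s bus => bus.2.foldl (fun s f => if (PySem.Dict.mk m).contains f.2 then PySem.Set.add s f.2 else s) s) PySem.Set.empty) t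
    = ((PySem.Dict.mk m).contains t && pvReferenced m t) := by
  rw [pv_outer]
  simp [pvReferenced, PySem.Set.empty]

theorem pv_dict_contains (m : List (String × List (String × String))) (t : String) :
    (PySem.Dict.mk m).contains t = (m.map Prod.fst).contains t := by
  rw [Bool.eq_iff_iff]
  simp

-- A's roots set is B's roots list
theorem pv_roots (m : List (String × List (String × String)))
    (hnd : (m.map Prod.fst).Nodup) :
    PySem.Set.diff (PySem.Set.ofList (PySem.Dict.keys (PySem.Dict.mk m)))
      (m.foldl (fun s bus => bus.2.foldl (fun s f => if (PySem.Dict.mk m).contains f.2 then PySem.Set.add s f.2 else s) s) PySem.Set.empty)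
    = (m.map Prod.fst).filter (fun k => !pvReferenced m k) := by
  have hkeys : PySem.Dict.keys (PySem.Dict.mk m) = m.map Prod.fst := rfl
  rw [hkeys, PySem.Set.ofList_eq_self_of_nodup _ hnd]
  show List.filter _ _ = _
  apply List.filter_congr
  intro k hk
  rw [pv_allDep]
  have hc : (PySem.Dict.mk m).contains k = true := by
    rw [pv_dict_contains, Bool.eq_iff_iff]
    simpa using hk
  simp [hc]

-- the two ports agree whenever the key list is duplicate-free (no assertion hypothesis needed)
theorem pv_main_eq (m : List (String × List (String × String))) (r : String)
    (hnd : (m.map Prod.fst).Nodup) :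
    find_and_rename_root_bus m r = find_and_rename_root_bus_alt m r := by
  unfold find_and_rename_root_bus find_and_rename_root_bus_alt
  simp only []
  rw [pv_roots m hnd, show (PySem.Dict.mk m).keys = m.map Prod.fst from rfl]
  have hlen : (PySem.Set.len ((m.map Prod.fst).filter (fun k => !pvReferenced m k)) = 1)
      ↔ (((m.map Prod.fst).filter (fun k => !pvReferenced m k)).length = 1) := by
    simp [PySem.Set.len]
  by_cases hL : ((m.map Prod.fst).filter (fun k => !pvReferenced m k)).length = 1
  · rw [if_pos (hlen.mpr hL), if_pos hL]
    rw [pv_allDep]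
    by_cases hC : ((PySem.Dict.mk m).contains r && pvReferenced m r) = true
    · rw [hC]
      cases (PySem.Dict.mk m).pop? (((m.map Prod.fst).filter (fun k => !pvReferenced m k)).headD "") <;> simp
    · have hC' : ((PySem.Dict.mk m).contains r && pvReferenced m r) = false := Bool.eq_false_iff.mpr hC
      rw [hC']
      cases (PySem.Dict.mk m).pop? (((m.map Prod.fst).filter (fun k => !pvReferenced m k)).headD "") <;> simp
  · rw [if_neg (fun h => hL (hlen.mp h)), if_neg hL]

-- ===== VERDICT (by name: the statement is the Claim_ definition above) =====
theorem find_and_rename_root_bus_spec : Claim_equal_find_and_rename_root_bus := by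
  intro m r _ hpre
  exact pv_main_eq m r hpre.1
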